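-- pv_equiv track=rewrite | github.com/CluelessCoder73/ExactCut-Video-Tools | vdscript_range_adjuster.py | find_next_p_or_i_frame
-- ===== SOURCE A (Python) =====
-- def find_next_p_or_i_frame(frame_num, frame_types):
--     max_frame = max(frame_types.keys())
--     if frame_types.get(frame_num) in ['I', 'P']:
--         return frame_num  # Return the current frame if it's already I or P
--     next_frame = frame_num + 1
--     while next_frame <= max_frame:
--         if frame_types.get(next_frame) in ['I', 'P']:
--             return next_frame
--         next_frame += 1
--     return frame_num  # Return original frame if no next I or P frame found
-- ===== SOURCE B (Python) =====
-- def find_next_p_or_i_frame(frame_num, frame_types):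
--     max_frame = max(frame_types.keys())  # preserves the ValueError on an empty dict
--     candidates = [f for f in frame_types
--                   if frame_num <= f <= max_frame and frame_types[f] in ('I', 'P')]
--     return min(candidates) if candidates else frame_num
-- ===== Notes on version B (the rewrite author's own statement) =====
-- stated objective: faster
-- what changed: Instead of stepping every integer from frame_num+1 up to max(keys) and probing the dict at each step, B filters the dict's actual entries once for keys >= frame_num whose type is I or P and returns their minimum (or frame_num if none).
import Mathlib
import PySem

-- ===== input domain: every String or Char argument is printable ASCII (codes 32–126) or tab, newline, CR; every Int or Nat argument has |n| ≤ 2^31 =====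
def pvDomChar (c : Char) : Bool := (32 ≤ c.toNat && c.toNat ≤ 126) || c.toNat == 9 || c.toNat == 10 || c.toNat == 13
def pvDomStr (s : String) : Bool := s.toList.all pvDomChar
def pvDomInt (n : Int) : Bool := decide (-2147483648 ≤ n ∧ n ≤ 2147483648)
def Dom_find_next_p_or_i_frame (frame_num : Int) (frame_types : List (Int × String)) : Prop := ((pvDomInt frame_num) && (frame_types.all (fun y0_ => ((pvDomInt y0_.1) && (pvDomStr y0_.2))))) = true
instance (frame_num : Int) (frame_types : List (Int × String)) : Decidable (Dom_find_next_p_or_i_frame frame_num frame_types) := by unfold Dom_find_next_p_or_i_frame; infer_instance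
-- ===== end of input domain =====

-- B replaces A's integer-stepping scan (probe every frame number up to max(keys))
-- by one filter-and-minimum pass over the dict's actual entries; return value only.


-- ===== PORT A =====
-- dict.get(k): first match in the association list (dicts have unique keys, so first match = the match)
def pyGet (fts : List (Int × String)) (k : Int) : Option String :=
  (fts.find? (fun p => p.1 == k)).map Prod.snd

-- `x in ['I', 'P']` on the Option returned by .get
def isIP (o : Option String) : Bool := o == some "I" || o == some "P"

-- the `while next_frame <= max_frame` loop; some r = `return next_frame`, none = fall through
def aScan (fts : List (Int × String)) (max_frame next_frame : Int) : Option Int :=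
  if _h : next_frame ≤ max_frame then
    if isIP (pyGet fts next_frame) then some next_frame
    else aScan fts max_frame (next_frame + 1)
  else none
termination_by (max_frame + 1 - next_frame).toNat
decreasing_by omega

def find_next_p_or_i_frame (frame_num : Int) (frame_types : List (Int × String)) : Int :=
  match PySem.List.max? (frame_types.map Prod.fst) (fun x => x) with
  | none => 0   -- Python raises ValueError on an empty dict; excluded by Pre_
  | some max_frame =>
    if isIP (pyGet frame_types frame_num) then frame_num
    else
      match aScan frame_types max_frame (frame_num + 1) with
      | some r => r
      | none => frame_num

-- ===== PORT B =====
def find_next_p_or_i_frame_alt (frame_num : Int) (frame_types : List (Int × String)) : Int :=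
  match PySem.List.max? (frame_types.map Prod.fst) (fun x => x) with
  | none => 0   -- Python raises ValueError on an empty dict; excluded by Pre_
  | some max_frame =>
    let candidates := (frame_types.filter
      (fun p => decide (frame_num ≤ p.1) && decide (p.1 ≤ max_frame)
                && isIP (pyGet frame_types p.1))).map Prod.fst
    match PySem.List.min? candidates (fun x => x) with
    | some m => m
    | none => frame_num

-- ===== PRECONDITION & SPEC =====
-- Pre_ excludes only the empty dict, on which Python A raises ValueError (max of empty sequence).
def Pre_find_next_p_or_i_frame (frame_num : Int) (frame_types : List (Int × String)) : Prop :=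
  frame_types ≠ []
instance (frame_num : Int) (frame_types : List (Int × String)) : Decidable (Pre_find_next_p_or_i_frame frame_num frame_types) := by unfold Pre_find_next_p_or_i_frame; infer_instance
def pvWitness_find_next_p_or_i_frame : Int × (List (Int × String)) := (0, [(0, "I")])

def Spec_find_next_p_or_i_frame (frame_num : Int) (frame_types : List (Int × String)) (out : Int) : Prop := out = find_next_p_or_i_frame_alt frame_num frame_types
instance (frame_num : Int) (frame_types : List (Int × String)) (out : Int) : Decidable (Spec_find_next_p_or_i_frame frame_num frame_types out) := by unfold Spec_find_next_p_or_i_frame; infer_instance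

-- ===== CLAIM (what is proved, stated in full; the proofs are below) =====
def Claim_equal_find_next_p_or_i_frame : Prop := ∀ (frame_num : Int) (frame_types : List (Int × String)), Dom_find_next_p_or_i_frame frame_num frame_types → Pre_find_next_p_or_i_frame frame_num frame_types → Spec_find_next_p_or_i_frame frame_num frame_types (find_next_p_or_i_frame frame_num frame_types)

-- ===== LEMMAS AND PROOFS =====

-- a frame whose type is I or P is a key of the dict
lemma mem_keys_of_isIP {fts : List (Int × String)} {f : Int}
    (h : isIP (pyGet fts f) = true) : f ∈ fts.map Prod.fst := by
  unfold isIP pyGet at h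
  cases hf : fts.find? (fun p => p.1 == f) with
  | none => simp [hf] at h
  | some p =>
    have hmem := List.mem_of_find?_eq_some hf
    have hp := List.find?_some hf
    simp at hp
    exact List.mem_map.mpr ⟨p, hmem, hp⟩

lemma aScan_none {fts : List (Int × String)} {M n : Int}
    (h : aScan fts M n = none) :
    ∀ f, n ≤ f → f ≤ M → isIP (pyGet fts f) = false := by
  intro f hnf hfM
  fun_induction aScan fts M n with
  | case1 n hle hip => simp at h
  | case2 n hle hip ih =>
    rcases eq_or_lt_of_le hnf with rfl | hlt
    · exact eq_false_of_ne_true (by simp_all)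
    · exact ih h (by omega)
  | case3 n hle => omega

lemma aScan_some {fts : List (Int × String)} {M n r : Int}
    (h : aScan fts M n = some r) :
    n ≤ r ∧ r ≤ M ∧ isIP (pyGet fts r) = true ∧
      ∀ f, n ≤ f → f < r → isIP (pyGet fts f) = false := by
  fun_induction aScan fts M n with
  | case1 n hle hip =>
    simp only [Option.some.injEq] at h
    subst h
    exact ⟨le_refl _, hle, hip, fun f h1 h2 => by omega⟩
  | case2 n hle hip ih =>
    obtain ⟨h1, h2, h3, h4⟩ := ih h
    refine ⟨by omega, h2, h3, fun f hf1 hf2 => ?_⟩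
    rcases eq_or_lt_of_le hf1 with rfl | hlt
    · exact eq_false_of_ne_true (by simp_all)
    · exact h4 f (by omega) hf2
  | case3 n hle => simp at h

-- membership in B's candidate list
lemma mem_candidates {fts : List (Int × String)} {fn M f : Int} :
    f ∈ (fts.filter (fun p => decide (fn ≤ p.1) && decide (p.1 ≤ M)
          && isIP (pyGet fts p.1))).map Prod.fst ↔
    f ∈ fts.map Prod.fst ∧ fn ≤ f ∧ f ≤ M ∧ isIP (pyGet fts f) = true := by
  constructor
  · rintro hm
    rcases List.mem_map.mp hm with ⟨p, hp, rfl⟩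
    have hf := List.mem_filter.mp hp
    simp at hf
    exact ⟨List.mem_map.mpr ⟨p, hf.1, rfl⟩, hf.2.1.1, hf.2.1.2, hf.2.2⟩
  · rintro ⟨hk, h1, h2, h3⟩
    rcases List.mem_map.mp hk with ⟨p, hp, rfl⟩
    exact List.mem_map.mpr ⟨p, List.mem_filter.mpr (by simp [hp, h1, h2, h3]), rfl⟩

-- ===== VERDICT (by name: the statement is the Claim_ definition above) =====
theorem find_next_p_or_i_frame_spec : Claim_equal_find_next_p_or_i_frame := by
  intro fn fts _ _
  unfold Spec_find_next_p_or_i_frame find_next_p_or_i_frame find_next_p_or_i_frame_alt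
  cases hmax : PySem.List.max? (fts.map Prod.fst) (fun x => x) with
  | none => rfl
  | some M =>
    have hleM : ∀ f ∈ fts.map Prod.fst, f ≤ M := fun f hf => PySem.List.max?_isMax hmax f hf
    dsimp only
    by_cases hIP : isIP (pyGet fts fn) = true
    · simp only [hIP, if_true]
      have hkey := mem_keys_of_isIP hIP
      have hfn : fn ∈ (fts.filter (fun p => decide (fn ≤ p.1) && decide (p.1 ≤ M)
          && isIP (pyGet fts p.1))).map Prod.fst :=
        mem_candidates.mpr ⟨hkey, le_refl _, hleM _ hkey, hIP⟩
      cases hmin : PySem.List.min? ((fts.filter (fun p => decide (fn ≤ p.1) && decide (p.1 ≤ M)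
          && isIP (pyGet fts p.1))).map Prod.fst) (fun x => x) with
      | none => rfl
      | some m =>
        obtain ⟨_, hm1, _, _⟩ := mem_candidates.mp (PySem.List.min?_mem hmin)
        have hmle : m ≤ fn := PySem.List.min?_isMin hmin fn hfn
        show fn = m
        omega
    · rw [if_neg hIP]
      cases hscan : aScan fts M (fn + 1) with
      | some r =>
        obtain ⟨h1, h2, h3, h4⟩ := aScan_some hscan
        have hr : r ∈ (fts.filter (fun p => decide (fn ≤ p.1) && decide (p.1 ≤ M)
            && isIP (pyGet fts p.1))).map Prod.fst :=
          mem_candidates.mpr ⟨mem_keys_of_isIP h3, by omega, h2, h3⟩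
        cases hmin : PySem.List.min? ((fts.filter (fun p => decide (fn ≤ p.1) && decide (p.1 ≤ M)
            && isIP (pyGet fts p.1))).map Prod.fst) (fun x => x) with
        | none =>
          rw [PySem.List.min?_eq_none_iff] at hmin
          simp [hmin] at hr
        | some m =>
          obtain ⟨hmk, hm1, hm2, hm3⟩ := mem_candidates.mp (PySem.List.min?_mem hmin)
          have hmle : m ≤ r := PySem.List.min?_isMin hmin r hr
          have hmfn : m ≠ fn := fun he => hIP (he ▸ hm3)
          rcases eq_or_lt_of_le hmle with rfl | hlt
          · rfl
          · exact absurd hm3 (by simp [h4 m (by omega) hlt])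
      | none =>
        have hnone := aScan_none hscan
        cases hmin : PySem.List.min? ((fts.filter (fun p => decide (fn ≤ p.1) && decide (p.1 ≤ M)
            && isIP (pyGet fts p.1))).map Prod.fst) (fun x => x) with
        | none => rfl
        | some m =>
          obtain ⟨hmk, hm1, hm2, hm3⟩ := mem_candidates.mp (PySem.List.min?_mem hmin)
          have hmfn : m ≠ fn := fun he => hIP (he ▸ hm3)
          exact absurd hm3 (by simp [hnone m (by omega) hm2])
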